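-- pv_equiv track=rewrite | github.com/jbbranch9/jbbranch9.github.io | CS_160/Python_Programs/Programs/mastermind/mastermind_six_color.py | color_count
-- ===== SOURCE A (Python) =====
-- def color_count(list):
--     count_list = []
--     for j in range(4):
--         color = ["R", "G", "B", "W"][j]
--         count = 0
--         for i in range(len(list)):
--             if list[i] == color:
--                 count = count + 1
--         count_list.append(count)
--     return count_list
-- ===== SOURCE B (Python) =====
-- def color_count(list):
--     counts = {}
--     for x in list:
--         counts[x] = counts.get(x, 0) + 1
--     return [counts.get(c, 0) for c in ["R", "G", "B", "W"]]
-- ===== Notes on version B (the rewrite author's own statement) =====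
-- stated objective: idiomatic
-- what changed: Replaces four full scans (one per color) with a single pass building a count table, then four constant-time lookups for the fixed colors.
import Mathlib
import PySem

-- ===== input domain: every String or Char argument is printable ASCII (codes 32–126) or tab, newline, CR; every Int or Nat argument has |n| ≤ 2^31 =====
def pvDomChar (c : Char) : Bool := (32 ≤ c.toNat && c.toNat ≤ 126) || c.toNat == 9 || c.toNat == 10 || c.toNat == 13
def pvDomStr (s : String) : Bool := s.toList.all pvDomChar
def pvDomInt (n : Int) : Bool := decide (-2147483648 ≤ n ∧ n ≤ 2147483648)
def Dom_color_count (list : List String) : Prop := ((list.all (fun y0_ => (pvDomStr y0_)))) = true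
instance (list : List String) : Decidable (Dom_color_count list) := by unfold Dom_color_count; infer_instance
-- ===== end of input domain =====

-- B builds one count table in a single pass and looks up the four fixed colors (idiomatic Counter style); A scans the whole list once per color.

-- ===== PORT A =====
def color_count (list : List String) : List Int :=
  (PySem.List.pyRange 0 4 1).foldl (fun count_list j =>
    let color := PySem.List.pyGetD (["R", "G", "B", "W"] : List String) j ""
    let count := (PySem.List.pyRange 0 (list.length : Int) 1).foldl
      (fun count i => if PySem.List.pyGetD list i "" == color then count + 1 else count) (0 : Int)
    count_list ++ [count]) []

-- ===== PORT B =====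
def color_count_alt (list : List String) : List Int :=
  let counts : PySem.Dict String Int :=
    list.foldl (fun d x => d.insert x (d.getD x 0 + 1)) PySem.Dict.empty
  (["R", "G", "B", "W"] : List String).map (fun c => counts.getD c 0)

-- ===== PRECONDITION & SPEC =====
def Spec_color_count (list : List String) (out : List Int) : Prop := out = color_count_alt list
instance (list : List String) (out : List Int) : Decidable (Spec_color_count list out) := by unfold Spec_color_count; infer_instance

-- ===== CLAIM (what is proved, stated in full; the proofs are below) =====
def Claim_equal_color_count : Prop := ∀ (list : List String), Dom_color_count list → Spec_color_count list (color_count list)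

-- ===== LEMMAS AND PROOFS =====

-- A's inner loop (index scan testing equality with one color) is the count of that color.
lemma color_count_inner (list : List String) (color : String) :
    (PySem.List.pyRange 0 (list.length : Int) 1).foldl
      (fun count i => if PySem.List.pyGetD list i "" == color then count + 1 else count) (0 : Int)
      = (list.count color : Int) := by
  rw [PySem.List.foldl_pyRange_zero_pyGetD' list "" (fun count x => if x == color then count + 1 else count) 0,
      PySem.List.foldl_beq_add_one]
  simp

-- B's table lookup is also the count of each color.
lemma color_count_alt_lookup (list : List String) (c : String) :
    (list.foldl (fun d x => d.insert x (d.getD x 0 + 1)) PySem.Dict.empty).getD c 0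
      = (list.count c : Int) := by
  rw [PySem.Dict.foldl_insert_getD_add_one_eq_counter, PySem.Dict.getD_counter]

-- ===== VERDICT (by name: the statement is the Claim_ definition above) =====
theorem color_count_spec : Claim_equal_color_count := by
  intro list _
  unfold Spec_color_count color_count color_count_alt
  have h4 : PySem.List.pyRange 0 4 1 = [0, 1, 2, 3] := by decide
  rw [h4]
  simp only [List.foldl, List.map]
  rw [color_count_inner, color_count_inner, color_count_inner, color_count_inner,
      color_count_alt_lookup, color_count_alt_lookup, color_count_alt_lookup, color_count_alt_lookup]
  rfl
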